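-- pv_equiv track=rewrite | github.com/antonkrupin/algorithms | maximumDiscount.py | MaximumDiscount
-- ===== SOURCE A (Python) =====
-- def MaximumDiscount(quantityOfGoods, prices):
--     sortedPrices = sorted(prices)
--     baseDiscount = 0
--     slicedPrices = []
--     if(quantityOfGoods < 3):
--         return 0
--     if(quantityOfGoods == 3):
--         return min(prices)
--
--     def minPrice(prices):
--         return min(prices)
--
--     if(quantityOfGoods > 3):
--         freeGoodsQuantity = len(prices)//3
--         baseDiscount = sum(sortedPrices[:freeGoodsQuantity])
--         pointer = 0
--
--         for x in range(len(prices)):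
--             p = prices[pointer:pointer+3]
--             if(len(p) == 3):
--                 slicedPrices.append(prices[pointer:pointer+3])
--             pointer += 3
--
--         discount = 0
--
--         for x in range(len(slicedPrices)):
--             discount += min(slicedPrices[x])
--
--         if(discount >= baseDiscount):
--             return discount
--         else:
--             return baseDiscount
-- ===== SOURCE B (Python) =====
-- def MaximumDiscount(quantityOfGoods, prices):
--     if quantityOfGoods < 3:
--         return 0
--     if quantityOfGoods == 3:
--         return min(prices)
--     base = _sum_k_smallest(prices, len(prices) // 3)
--     return max(_grouped(prices), base)
--
--
-- def _sum_k_smallest(xs, k):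
--     # quickselect-style partial sum: sum of the k smallest values of xs,
--     # without sorting, by repeated three-way partitioning around a pivot.
--     total = 0
--     while k > 0:
--         p = xs[len(xs) // 2]
--         less = [x for x in xs if x < p]
--         eq = [x for x in xs if x == p]
--         greater = [x for x in xs if x > p]
--         if k <= len(less):
--             xs = less
--         elif k <= len(less) + len(eq):
--             return total + sum(less) + p * (k - len(less))
--         else:
--             total += sum(less) + p * len(eq)
--             k -= len(less) + len(eq)
--             xs = greater
--     return total
--
--
-- def _grouped(xs):
--     # consecutive triples via the zip-of-one-iterator idiom
--     it = iter(xs)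
--     total = 0
--     for a, b, c in zip(it, it, it):
--         total += min(a, b, c)
--     return total
-- ===== Notes on version B (the rewrite author's own statement) =====
-- stated objective: faster
-- what changed: B never sorts: the sum of the n//3 smallest prices is computed by a quickselect-style three-way-partition recursion (_sum_k_smallest), and the grouped-triples sum by a direct structural recursion three elements at a time, replacing A's sort + slice-list construction + second indexed loop.
import Mathlib
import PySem

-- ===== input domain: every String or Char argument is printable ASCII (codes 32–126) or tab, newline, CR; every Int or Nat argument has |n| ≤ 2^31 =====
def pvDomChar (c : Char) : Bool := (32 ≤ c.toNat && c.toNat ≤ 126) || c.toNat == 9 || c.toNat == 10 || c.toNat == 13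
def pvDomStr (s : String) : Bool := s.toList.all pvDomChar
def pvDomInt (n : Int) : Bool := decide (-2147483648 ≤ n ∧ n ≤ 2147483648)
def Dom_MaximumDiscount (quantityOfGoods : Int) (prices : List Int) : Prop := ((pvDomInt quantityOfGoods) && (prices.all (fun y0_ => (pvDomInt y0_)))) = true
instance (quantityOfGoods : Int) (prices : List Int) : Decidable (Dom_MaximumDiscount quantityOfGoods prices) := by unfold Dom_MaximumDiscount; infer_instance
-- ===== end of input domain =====

-- B avoids sorting entirely: the n//3-smallest sum comes from a quickselect-style three-way-partition loop and the triple minima from a zip-triples pass; return value only, no mutation.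


-- ===== PORT A =====
def MaximumDiscount (quantityOfGoods : Int) (prices : List Int) : Int :=
  let sortedPrices := PySem.List.sorted prices (fun x => x) false
  if quantityOfGoods < 3 then 0
  else if quantityOfGoods = 3 then
    -- min(prices): raises on []; Pre_ excludes that input, so .getD 0 is never taken
    (PySem.List.min? prices (fun x => x)).getD 0
  else
    let freeGoodsQuantity := PySem.Int.floordiv (prices.length : Int) 3
    let baseDiscount := (PySem.List.slice sortedPrices none (some freeGoodsQuantity)).sum
    let st := (PySem.List.pyRange 0 (prices.length : Int) 1).foldl
      (fun (s : Int × List (List Int)) _ =>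
        let p := PySem.List.slice prices (some s.1) (some (s.1 + 3))
        (s.1 + 3,
         if p.length = 3 then s.2 ++ [PySem.List.slice prices (some s.1) (some (s.1 + 3))]
         else s.2))
      ((0 : Int), ([] : List (List Int)))
    let slicedPrices := st.2
    let discount := (PySem.List.pyRange 0 (slicedPrices.length : Int) 1).foldl
      (fun acc x =>
        -- min(slicedPrices[x]): x is in range and each slice is nonempty, defaults never taken
        acc + (PySem.List.min? (PySem.List.pyGetD slicedPrices x []) (fun y => y)).getD 0)
      0
    if discount ≥ baseDiscount then discount else baseDiscount

-- ===== PORT B =====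
-- _grouped of Source B: the zip(it,it,it) loop walks consecutive triples, summing min(a,b,c)
def pvGrouped : List Int → Int
  | a :: b :: c :: r => min (min a b) c + pvGrouped r
  | _ => 0

-- termination facts for pvSumK (the two recursive branches drop the pivot, so they shrink)
theorem pvFilterPivotLt (xs : List Int) {p : Int} (hmem : p ∈ xs) (q : Int → Bool)
    (hq : q p = false) : (xs.filter q).length < xs.length :=
  List.length_filter_lt_length_iff_exists.mpr ⟨p, hmem, by simp [hq]⟩

theorem pvPivotMem (xs : List Int) (hx : xs ≠ []) : xs.getD (xs.length / 2) 0 ∈ xs := by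
  have h0 : 0 < xs.length := List.length_pos_of_ne_nil hx
  have hlt : xs.length / 2 < xs.length := Nat.div_lt_self h0 (by omega)
  rw [List.getD_eq_getElem xs 0 hlt]
  exact List.getElem_mem hlt

theorem pvAttachFilterLen (xs : List Int) (q : Int → Bool) :
    (xs.attach.filter (fun x => q x.1)).length = (xs.filter q).length := by
  rw [List.filter_attach]
  simp

-- _sum_k_smallest of Source B: quickselect-style while loop, three-way partition around the middle element
def pvSumK (xs : List Int) (k total : Int) : Int :=
  if k ≤ 0 then total
  else if hx : xs = [] then total  -- Python raises IndexError here (xs[len//2] on []); unreachable from the entry, where k ≤ len(xs)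
  else
    let p := xs.getD (xs.length / 2) 0  -- xs[len(xs)//2]: the index is in range, exact
    let less := xs.filter (fun x => decide (x < p))
    let eq := xs.filter (fun x => decide (x = p))
    let greater := xs.filter (fun x => decide (p < x))
    if k ≤ (less.length : Int) then pvSumK less k total
    else if k ≤ (less.length : Int) + (eq.length : Int) then
      total + less.sum + p * (k - less.length)
    else pvSumK greater (k - less.length - eq.length) (total + less.sum + p * eq.length)
termination_by xs.length
decreasing_by
  · refine lt_of_le_of_lt (le_of_eq ?_)
      (pvFilterPivotLt xs (pvPivotMem xs hx)
        (fun x => decide (x < xs.getD (xs.length / 2) 0)) (by simp))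
    simpa [List.getD_eq_getElem?_getD] using
      pvAttachFilterLen xs (fun x => decide (x < xs.getD (xs.length / 2) 0))
  · refine lt_of_le_of_lt (le_of_eq ?_)
      (pvFilterPivotLt xs (pvPivotMem xs hx)
        (fun x => decide (xs.getD (xs.length / 2) 0 < x)) (by simp))
    simpa [List.getD_eq_getElem?_getD] using
      pvAttachFilterLen xs (fun x => decide (xs.getD (xs.length / 2) 0 < x))

def MaximumDiscount_alt (quantityOfGoods : Int) (prices : List Int) : Int :=
  if quantityOfGoods < 3 then 0
  else if quantityOfGoods = 3 then
    (PySem.List.min? prices (fun x => x)).getD 0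
  else
    let base := pvSumK prices (PySem.Int.floordiv (prices.length : Int) 3) 0
    max (pvGrouped prices) base

-- ===== PRECONDITION & SPEC =====
-- Pre_ excludes only quantityOfGoods = 3 with an empty price list, where A (and B) raise ValueError on min([]).
def Pre_MaximumDiscount (quantityOfGoods : Int) (prices : List Int) : Prop :=
  ¬ (quantityOfGoods = 3 ∧ prices = [])
instance (quantityOfGoods : Int) (prices : List Int) : Decidable (Pre_MaximumDiscount quantityOfGoods prices) := by unfold Pre_MaximumDiscount; infer_instance
def pvWitness_MaximumDiscount : Int × List Int := (4, [3, 1, 2, 7, 4, 6])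

def Spec_MaximumDiscount (quantityOfGoods : Int) (prices : List Int) (out : Int) : Prop := out = MaximumDiscount_alt quantityOfGoods prices
instance (quantityOfGoods : Int) (prices : List Int) (out : Int) : Decidable (Spec_MaximumDiscount quantityOfGoods prices out) := by unfold Spec_MaximumDiscount; infer_instance

-- ===== CLAIM (what is proved, stated in full; the proofs are below) =====
def Claim_equal_MaximumDiscount : Prop := ∀ (quantityOfGoods : Int) (prices : List Int), Dom_MaximumDiscount quantityOfGoods prices → Pre_MaximumDiscount quantityOfGoods prices → Spec_MaximumDiscount quantityOfGoods prices (MaximumDiscount quantityOfGoods prices)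

-- ===== LEMMAS AND PROOFS =====

-- full chunks of three, in order (proof-side characterisation of A's slicedPrices)
def pvChunks : List Int → List (List Int)
  | a :: b :: c :: r => [a, b, c] :: pvChunks r
  | _ => []

theorem pvChunks_short {xs : List Int} (h : xs.length < 3) : pvChunks xs = [] := by
  match xs, h with
  | [], _ => rfl
  | [_], _ => rfl
  | [_, _], _ => rfl

theorem pvChunks_long {xs : List Int} (h : 3 ≤ xs.length) :
    pvChunks xs = xs.take 3 :: pvChunks (xs.drop 3) := by
  match xs, h with
  | a :: b :: c :: r, _ => rfl

-- A's first loop: after the iterations of l starting at pointer 3*j, the slice list is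
-- acc ++ pvChunks (drop (3*j)), provided the iterations suffice to pass the end of the list
theorem pvAfold {α : Type} (prices : List Int) :
    ∀ (l : List α) (j : Nat) (acc : List (List Int)),
      prices.length ≤ 3 * j + 3 * l.length →
      (l.foldl
        (fun (s : Int × List (List Int)) _ =>
          let p := PySem.List.slice prices (some s.1) (some (s.1 + 3))
          (s.1 + 3,
           if p.length = 3 then s.2 ++ [PySem.List.slice prices (some s.1) (some (s.1 + 3))]
           else s.2))
        ((3 * (j : Int)), acc)).2
      = acc ++ pvChunks (prices.drop (3 * j)) := by
  intro l
  induction l with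
  | nil =>
    intro j acc hle
    simp only [List.length_nil, Nat.mul_zero, Nat.add_zero] at hle
    simp only [List.foldl_nil]
    rw [pvChunks_short (by rw [List.length_drop]; omega)]
    simp
  | cons x l ih =>
    intro j acc hle
    simp only [List.length_cons] at hle
    simp only [List.foldl_cons]
    have c1 : (3 * (j : Int)) = ((3 * j : Nat) : Int) := by push_cast; ring
    have hsl : PySem.List.slice prices (some (3 * (j : Int))) (some (3 * (j : Int) + 3))
        = (prices.drop (3 * j)).take 3 := by
      rw [c1]
      have c2 : ((3 * j : Nat) : Int) + 3 = ((3 * j : Nat) : Int) + ((3 : Nat) : Int) := by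
        norm_num
      rw [c2, PySem.List.slice_natCast_add]
    have hptr : (3 * (j : Int) + 3) = 3 * (((j + 1 : Nat)) : Int) := by push_cast; ring
    by_cases h3 : 3 ≤ (prices.drop (3 * j)).length
    · have hlen : ((prices.drop (3 * j)).take 3).length = 3 := by
        rw [List.length_take]; omega
      have hle' : prices.length ≤ 3 * (j + 1) + 3 * l.length := by omega
      rw [hsl, if_pos hlen, hptr, ih (j + 1) (acc ++ [(prices.drop (3 * j)).take 3]) hle']
      have hdd : prices.drop (3 * (j + 1)) = (prices.drop (3 * j)).drop 3 := by
        rw [List.drop_drop]; congr 1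
      rw [hdd, pvChunks_long h3]
      simp
    · have hlen : ((prices.drop (3 * j)).take 3).length ≠ 3 := by
        rw [List.length_take]; omega
      have L1 : (prices.drop (3 * j)).length < 3 := by omega
      have L2 : (prices.drop (3 * (j + 1))).length < 3 := by
        rw [List.length_drop] at L1 ⊢; omega
      have hle' : prices.length ≤ 3 * (j + 1) + 3 * l.length := by omega
      rw [hsl, if_neg hlen, hptr, ih (j + 1) acc hle']
      rw [pvChunks_short L1, pvChunks_short L2]

-- sum of minima over the chunks is B's pvGrouped
theorem pvChunks_minsum : ∀ (n : Nat) (xs : List Int), xs.length ≤ n →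
    ((pvChunks xs).map (fun c => (PySem.List.min? c (fun y => y)).getD 0)).sum = pvGrouped xs := by
  intro n
  induction n with
  | zero =>
    intro xs h
    match xs, h with
    | [], _ => rfl
  | succ n ih =>
    intro xs h
    match xs, h with
    | [], _ => rfl
    | [_], _ => rfl
    | [_, _], _ => rfl
    | a :: b :: c :: r, h =>
      simp only [pvChunks, pvGrouped, List.map_cons, List.sum_cons]
      rw [ih r (by simp only [List.length_cons] at h; omega)]
      congr 1
      rw [PySem.List.min?_id_cons]
      rfl

theorem pvSumK_step (xs : List Int) (k total : Int) (hk : ¬ k ≤ 0) (hx : ¬ xs = []) :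
    pvSumK xs k total =
      (if k ≤ ((xs.filter (fun x => decide (x < xs.getD (xs.length / 2) 0))).length : Int) then
         pvSumK (xs.filter (fun x => decide (x < xs.getD (xs.length / 2) 0))) k total
       else if k ≤ ((xs.filter (fun x => decide (x < xs.getD (xs.length / 2) 0))).length : Int)
           + ((xs.filter (fun x => decide (x = xs.getD (xs.length / 2) 0))).length : Int) then
         total + (xs.filter (fun x => decide (x < xs.getD (xs.length / 2) 0))).sum
           + xs.getD (xs.length / 2) 0
             * (k - (xs.filter (fun x => decide (x < xs.getD (xs.length / 2) 0))).length)
       else pvSumK (xs.filter (fun x => decide (xs.getD (xs.length / 2) 0 < x)))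
         (k - (xs.filter (fun x => decide (x < xs.getD (xs.length / 2) 0))).length
            - (xs.filter (fun x => decide (x = xs.getD (xs.length / 2) 0))).length)
         (total + (xs.filter (fun x => decide (x < xs.getD (xs.length / 2) 0))).sum
            + xs.getD (xs.length / 2) 0
              * (xs.filter (fun x => decide (x = xs.getD (xs.length / 2) 0))).length)) := by
  rw [pvSumK, if_neg hk, dif_neg hx]

-- the three-way partition around p is a permutation of the list
theorem pvPartitionPerm (p : Int) : ∀ xs : List Int,
    ((xs.filter fun x => decide (x < p)) ++ (xs.filter fun x => decide (x = p))
      ++ (xs.filter fun x => decide (p < x))).Perm xs := by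
  intro xs
  induction xs with
  | nil => simp
  | cons a t ih =>
    rcases lt_trichotomy a p with h | h | h
    · have h1 : (decide (a < p)) = true := by simp [h]
      have h2 : (decide (a = p)) = false := by simp [ne_of_lt h]
      have h3 : (decide (p < a)) = false := by simp [not_lt.2 h.le]
      simp only [List.filter_cons, h1, h2, h3, if_true, if_false, Bool.false_eq_true,
        List.cons_append]
      exact ih.cons a
    · have h1 : (decide (a < p)) = false := by simp [h]
      have h2 : (decide (a = p)) = true := by simp [h]
      have h3 : (decide (p < a)) = false := by simp [h]
      simp only [List.filter_cons, h1, h2, h3, if_true, if_false, Bool.false_eq_true]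
      have e1 : (t.filter fun x => decide (x < p)) ++ (a :: (t.filter fun x => decide (x = p)))
            ++ (t.filter fun x => decide (p < x))
          = (t.filter fun x => decide (x < p)) ++ a :: ((t.filter fun x => decide (x = p))
            ++ (t.filter fun x => decide (p < x))) := by simp
      rw [e1]
      refine List.Perm.trans List.perm_middle (List.Perm.cons a ?_)
      simpa [List.append_assoc] using ih
    · have h1 : (decide (a < p)) = false := by simp [not_lt.2 h.le]
      have h2 : (decide (a = p)) = false := by simp [ne_of_gt h]
      have h3 : (decide (p < a)) = true := by simp [h]
      simp only [List.filter_cons, h1, h2, h3, if_true, if_false, Bool.false_eq_true]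
      have e1 : (t.filter fun x => decide (x < p)) ++ (t.filter fun x => decide (x = p))
            ++ (a :: (t.filter fun x => decide (p < x)))
          = ((t.filter fun x => decide (x < p)) ++ (t.filter fun x => decide (x = p)))
            ++ a :: (t.filter fun x => decide (p < x)) := by simp
      rw [e1]
      exact List.Perm.trans List.perm_middle (List.Perm.cons a ih)

theorem pvAllEqPairwise (p : Int) : ∀ l : List Int, (∀ x ∈ l, x = p) → l.Pairwise (· ≤ ·) := by
  intro l
  induction l with
  | nil => intro _; exact List.Pairwise.nil
  | cons a t ih =>
    intro h
    refine List.Pairwise.cons ?_ (ih fun x hx => h x (List.mem_cons_of_mem a hx))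
    intro b hb
    rw [h a List.mem_cons_self, h b (List.mem_cons_of_mem a hb)]

theorem pvConstSum (p : Int) : ∀ l : List Int, (∀ x ∈ l, x = p) → l.sum = p * l.length := by
  intro l
  induction l with
  | nil => intro _; simp
  | cons a t ih =>
    intro h
    rw [List.sum_cons, ih fun x hx => h x (List.mem_cons_of_mem a hx),
      h a List.mem_cons_self]
    simp only [List.length_cons]
    push_cast
    ring

-- naming the sorted order: sorted xs = sorted (<p part) ++ (=p part) ++ sorted (>p part)
theorem pvSortedPartition (xs : List Int) (p : Int) :
    PySem.List.sorted xs (fun x => x) false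
      = PySem.List.sorted (xs.filter fun x => decide (x < p)) (fun x => x) false
        ++ (xs.filter fun x => decide (x = p))
        ++ PySem.List.sorted (xs.filter fun x => decide (p < x)) (fun x => x) false := by
  apply PySem.List.sorted_id_eq_of_perm_of_pairwise
  · refine List.Perm.trans ?_ (pvPartitionPerm p xs)
    exact ((PySem.List.sorted_perm _ _ _).append
      (List.Perm.refl _)).append (PySem.List.sorted_perm _ _ _)
  · have hE : ∀ x ∈ (xs.filter fun x => decide (x = p)), x = p := by
      intro x hx
      have h2 := (List.mem_filter.mp hx).2
      simpa using h2
    have hL : ∀ x ∈ PySem.List.sorted (xs.filter fun x => decide (x < p)) (fun x => x) false,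
        x < p := by
      intro x hx
      rw [PySem.List.mem_sorted] at hx
      have h2 := (List.mem_filter.mp hx).2
      simpa using h2
    have hG : ∀ x ∈ PySem.List.sorted (xs.filter fun x => decide (p < x)) (fun x => x) false,
        p < x := by
      intro x hx
      rw [PySem.List.mem_sorted] at hx
      have h2 := (List.mem_filter.mp hx).2
      simpa using h2
    rw [List.pairwise_append]
    refine ⟨?_, PySem.List.sorted_pairwise (xs.filter fun x => decide (p < x)) (fun x => x),
      ?_⟩
    · rw [List.pairwise_append]
      refine ⟨PySem.List.sorted_pairwise (xs.filter fun x => decide (x < p)) (fun x => x),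
        pvAllEqPairwise p _ hE, ?_⟩
      intro a ha b hb
      rw [hE b hb]
      exact (hL a ha).le
    · intro a ha b hb
      have hbp : p < b := hG b hb
      rcases List.mem_append.mp ha with haL | haE
      · exact (hL a haL).le.trans hbp.le
      · rw [hE a haE]
        exact hbp.le

-- the quickselect loop computes total + sum of the k smallest (take k of the sorted list)
theorem pvSumK_eq : ∀ (n : Nat) (xs : List Int) (k total : Int), xs.length ≤ n → 0 ≤ k →
    k ≤ (xs.length : Int) →
    pvSumK xs k total
      = total + ((PySem.List.sorted xs (fun x => x) false).take k.toNat).sum := by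
  intro n
  induction n with
  | zero =>
    intro xs k total hn hk0 hkl
    have hxl : xs.length = 0 := Nat.le_zero.mp hn
    have hk : k = 0 := by rw [hxl] at hkl; omega
    rw [pvSumK, if_pos (le_of_eq hk), hk]
    simp
  | succ n ih =>
    intro xs k total hn hk0 hkl
    by_cases hk : k ≤ 0
    · have hk' : k = 0 := le_antisymm hk hk0
      rw [pvSumK, if_pos hk, hk']
      simp
    · have hx : xs ≠ [] := by
        intro h
        rw [h] at hkl
        simp at hkl
        omega
      rw [pvSumK_step xs k total hk hx]
      set p := xs.getD (xs.length / 2) 0 with hp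
      set L := xs.filter (fun x => decide (x < p)) with hLdef
      set E := xs.filter (fun x => decide (x = p)) with hEdef
      set G := xs.filter (fun x => decide (p < x)) with hGdef
      have hperm := pvPartitionPerm p xs
      rw [← hLdef, ← hEdef, ← hGdef] at hperm
      have hlen : xs.length = L.length + E.length + G.length := by
        have := hperm.length_eq
        simp only [List.length_append] at this
        omega
      have hsp := pvSortedPartition xs p
      rw [← hLdef, ← hEdef, ← hGdef] at hsp
      have hLs : (PySem.List.sorted L (fun x => x) false).length = L.length :=
        (PySem.List.sorted_perm _ _ _).length_eq
      have hEp : ∀ x ∈ E, x = p := by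
        intro x hx'
        rw [hEdef] at hx'
        have h2 := (List.mem_filter.mp hx').2
        simpa using h2
      have hK : ((k.toNat : Nat) : Int) = k := Int.toNat_of_nonneg hk0
      have hsplit : (PySem.List.sorted xs (fun x => x) false).take k.toNat
          = (PySem.List.sorted L (fun x => x) false).take k.toNat
            ++ ((E.take (k.toNat - L.length))
            ++ (PySem.List.sorted G (fun x => x) false).take
                 (k.toNat - L.length - E.length)) := by
        rw [hsp, List.append_assoc, List.take_append, List.take_append, hLs]
      have hLn : L.length < xs.length :=
        pvFilterPivotLt xs (pvPivotMem xs hx) _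
          (by simp [hp, List.getD_eq_getElem?_getD])
      have hGn : G.length < xs.length :=
        pvFilterPivotLt xs (pvPivotMem xs hx) _
          (by simp [hp, List.getD_eq_getElem?_getD])
      by_cases h1 : k ≤ (L.length : Int)
      · rw [if_pos h1, ih L k total (by omega) hk0 h1, hsplit]
        have htE : k.toNat - L.length = 0 := by omega
        rw [htE]
        simp
      · rw [if_neg h1]
        have hLfull : (PySem.List.sorted L (fun x => x) false).take k.toNat
            = PySem.List.sorted L (fun x => x) false :=
          List.take_of_length_le (by omega)
        have hsumL : (PySem.List.sorted L (fun x => x) false).sum = L.sum :=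
          (PySem.List.sorted_perm _ _ _).sum_eq
        by_cases h2 : k ≤ (L.length : Int) + (E.length : Int)
        · rw [if_pos h2, hsplit, hLfull]
          have htG : k.toNat - L.length - E.length = 0 := by omega
          rw [htG]
          have hEtake : ∀ x ∈ E.take (k.toNat - L.length), x = p := fun x hx' =>
            hEp x (List.mem_of_mem_take hx')
          have hEtlen : (E.take (k.toNat - L.length)).length = k.toNat - L.length :=
            List.length_take_of_le (by omega)
          rw [List.take_zero, List.append_nil, List.sum_append, hsumL,
            pvConstSum p _ hEtake, hEtlen]
          have : ((k.toNat - L.length : Nat) : Int) = k - L.length := by omega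
          rw [this]
          ring
        · rw [if_neg h2]
          have hk' : (0:Int) ≤ k - L.length - E.length := by omega
          have hk'' : k - L.length - E.length ≤ (G.length : Int) := by
            have : (xs.length : Int) = (L.length : Int) + E.length + G.length := by
              exact_mod_cast congrArg (Nat.cast : Nat → Int) hlen
            omega
          rw [ih G (k - L.length - E.length) (total + L.sum + p * E.length)
            (by omega) hk' hk'', hsplit, hLfull]
          have hEfull : E.take (k.toNat - L.length) = E := by
            apply List.take_of_length_le
            omega
          rw [hEfull, List.sum_append, List.sum_append, hsumL,
            pvConstSum p E hEp]
          have : (k - ↑L.length - ↑E.length).toNat = k.toNat - L.length - E.length := by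
            omega
          rw [this]
          ring

-- ===== VERDICT (by name: the statement is the Claim_ definition above) =====
theorem MaximumDiscount_spec : Claim_equal_MaximumDiscount := by
  intro q prices _ hpre
  unfold Spec_MaximumDiscount MaximumDiscount MaximumDiscount_alt
  by_cases h1 : q < 3
  · simp [h1]
  · by_cases h2 : q = 3
    · simp [h2]
    · simp only [h1, h2, if_false]
      have hlenr : (PySem.List.pyRange 0 (prices.length : Int) 1).length = prices.length := by
        rw [PySem.List.pyRange_zero_natCast]; simp
      have hfold := pvAfold prices (PySem.List.pyRange 0 (prices.length : Int) 1) 0 []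
        (by rw [hlenr]; omega)
      have hz : (3 * ((0 : Nat) : Int)) = 0 := by norm_num
      rw [hz] at hfold
      simp only [Nat.mul_zero, List.drop_zero, List.nil_append] at hfold
      rw [hfold]
      rw [PySem.List.foldl_pyRange_zero_pyGetD' (pvChunks prices) []
        (fun (acc : Int) (c : List Int) => acc + (PySem.List.min? c (fun y => y)).getD 0) 0]
      rw [PySem.List.foldl_add (g := fun c => (PySem.List.min? c (fun y => y)).getD 0)]
      rw [pvChunks_minsum prices.length prices le_rfl]
      have hfq : (0:Int) ≤ PySem.Int.floordiv (prices.length : Int) 3 ∧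
          PySem.Int.floordiv (prices.length : Int) 3 ≤ (prices.length : Int) := by
        rw [PySem.Int.floordiv_eq_ediv_of_pos (by norm_num)]
        constructor
        · exact Int.ediv_nonneg (by positivity) (by norm_num)
        · exact (Int.ediv_le_self _ (by positivity)).trans le_rfl
      rw [pvSumK_eq prices.length prices _ 0 le_rfl hfq.1 hfq.2]
      rw [PySem.List.slice_to (PySem.List.sorted prices (fun x => x) false) hfq.1]
      rw [max_def]
      split_ifs <;> omega
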